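-- pv_equiv track=rewrite | github.com/eliottcassidy2000/math | 04-computation/h21_dichotomy_proof.py | max_matching_3cycles
-- ===== SOURCE A (Python) =====
-- def max_matching_3cycles(cycle_sets):
--     n = len(cycle_sets)
--     if n == 0:
--         return 0
--     # Check for size 3 matching
--     for a in range(n):
--         for b in range(a+1, n):
--             if cycle_sets[a] & cycle_sets[b]:
--                 continue
--             for c in range(b+1, n):
--                 if (not (cycle_sets[c] & cycle_sets[a])) and (not (cycle_sets[c] & cycle_sets[b])):
--                     return 3
--     # Check for size 2
--     for a in range(n):
--         for b in range(a+1, n):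
--             if not (cycle_sets[a] & cycle_sets[b]):
--                 return 2
--     return 1 if n > 0 else 0
-- ===== SOURCE B (Python) =====
-- def max_matching_3cycles(cycle_sets):
--     sets = list(cycle_sets)
--
--     def has2(ss):
--         # any disjoint pair in ss (scan suffixes)
--         while ss:
--             s, ss = ss[0], ss[1:]
--             if any(s.isdisjoint(t) for t in ss):
--                 return True
--         return False
--
--     def has3(ss):
--         # pick the first member s, look for a disjoint pair among the
--         # later sets that are themselves disjoint from s; else drop s
--         while ss:
--             s, ss = ss[0], ss[1:]
--             if has2([t for t in ss if s.isdisjoint(t)]):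
--                 return True
--         return False
--
--     if not sets:
--         return 0
--     if has3(sets):
--         return 3
--     if has2(sets):
--         return 2
--     return 1
-- ===== Notes on version B (the rewrite author's own statement) =====
-- stated objective: faster
-- what changed: Replaces A's index-based triple/double nested range loops with structural recursion on list suffixes: a reusable has2 pair-scan, and a has3 that first filters the later sets down to those disjoint from the head and then pair-scans only that filtered list, so the innermost scan runs over far fewer candidates.
import Mathlib
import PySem

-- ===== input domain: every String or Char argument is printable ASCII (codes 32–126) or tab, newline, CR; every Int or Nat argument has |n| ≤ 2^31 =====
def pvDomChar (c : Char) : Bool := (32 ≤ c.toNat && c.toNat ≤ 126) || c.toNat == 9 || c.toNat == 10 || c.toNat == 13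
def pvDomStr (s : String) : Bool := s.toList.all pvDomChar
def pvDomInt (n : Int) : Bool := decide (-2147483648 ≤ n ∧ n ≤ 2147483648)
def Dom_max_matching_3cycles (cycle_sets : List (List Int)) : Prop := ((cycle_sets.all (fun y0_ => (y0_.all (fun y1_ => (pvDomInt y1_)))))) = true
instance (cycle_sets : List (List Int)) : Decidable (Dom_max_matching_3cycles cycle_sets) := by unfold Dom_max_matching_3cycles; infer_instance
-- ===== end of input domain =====

-- ===== PORT A =====
-- B replaces A's index-range nested loops by structural recursion on list suffixes
-- (a reusable pair-scan and a filter-then-pair-scan for triples); the filtering prunes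
-- the inner scan (a timing run measured B faster).
-- truthiness of 'cycle_sets[a] & cycle_sets[b]' (sets; non-empty intersection)
def pvInter (x y : List Int) : Bool := x.any (fun v => y.contains v)

def max_matching_3cycles (cycle_sets : List (List Int)) : Int :=
  let n : Int := cycle_sets.length
  if n = 0 then 0
  else if (PySem.List.pyRange 0 n 1).any (fun a =>
      (PySem.List.pyRange (a+1) n 1).any (fun b =>
        if pvInter (PySem.List.pyGetD cycle_sets a []) (PySem.List.pyGetD cycle_sets b []) then false
        else (PySem.List.pyRange (b+1) n 1).any (fun c =>
          !pvInter (PySem.List.pyGetD cycle_sets c []) (PySem.List.pyGetD cycle_sets a []) &&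
          !pvInter (PySem.List.pyGetD cycle_sets c []) (PySem.List.pyGetD cycle_sets b [])))) then 3
  else if (PySem.List.pyRange 0 n 1).any (fun a =>
      (PySem.List.pyRange (a+1) n 1).any (fun b =>
        !pvInter (PySem.List.pyGetD cycle_sets a []) (PySem.List.pyGetD cycle_sets b []))) then 2
  else if n > 0 then 1 else 0

-- ===== PORT B =====
-- s.isdisjoint(t)
def pvDisj (x y : List Int) : Bool := x.all (fun v => !y.contains v)

def pvHas2 : List (List Int) → Bool
  | [] => false
  | s :: rest => rest.any (fun t => pvDisj s t) || pvHas2 rest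

def pvHas3 : List (List Int) → Bool
  | [] => false
  | s :: rest => pvHas2 (rest.filter (fun t => pvDisj s t)) || pvHas3 rest

def max_matching_3cycles_alt (cycle_sets : List (List Int)) : Int :=
  if cycle_sets.isEmpty then 0
  else if pvHas3 cycle_sets then 3
  else if pvHas2 cycle_sets then 2
  else 1

-- ===== PRECONDITION & SPEC =====
def Spec_max_matching_3cycles (cycle_sets : List (List Int)) (out : Int) : Prop := out = max_matching_3cycles_alt cycle_sets
instance (cycle_sets : List (List Int)) (out : Int) : Decidable (Spec_max_matching_3cycles cycle_sets out) := by unfold Spec_max_matching_3cycles; infer_instance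

-- ===== CLAIM (what is proved, stated in full; the proofs are below) =====
def Claim_equal_max_matching_3cycles : Prop := ∀ (cycle_sets : List (List Int)), Dom_max_matching_3cycles cycle_sets → Spec_max_matching_3cycles cycle_sets (max_matching_3cycles cycle_sets)

-- ===== LEMMAS AND PROOFS =====

-- generic suffix recursion: ranges over indices k..n in A become this recursion over drops
def recG (G : List Int → List (List Int) → Bool) : List (List Int) → Bool
  | [] => false
  | s :: rest => G s rest || recG G rest

lemma pvDisj_eq_not_inter (x y : List Int) : pvDisj x y = !pvInter x y := by
  simp [pvDisj, pvInter, List.all_eq_not_any_not]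

lemma pvDisj_comm (x y : List Int) : pvDisj x y = pvDisj y x := by
  apply Bool.coe_iff_coe.mp
  simp only [pvDisj]
  simp
  exact ⟨fun h a ha hb => h a hb ha, fun h a ha hb => h a hb ha⟩

lemma anyDrop (xs : List (List Int)) (G : List Int → List (List Int) → Bool) :
    ∀ (m : Nat) (k : Int), 0 ≤ k → xs.length - k.toNat = m →
    (PySem.List.pyRange k (xs.length : Int) 1).any
      (fun a => G (PySem.List.pyGetD xs a []) (xs.drop (a+1).toNat))
    = recG G (xs.drop k.toNat) := by
  intro m
  induction m with
  | zero =>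
    intro k hk hm
    have hge : (xs.length : Int) ≤ k := by omega
    rw [PySem.List.pyRange_one_eq_nil hge, List.drop_eq_nil_of_le (by omega)]
    simp [recG]
  | succ m ih =>
    intro k hk hm
    have hlt : k < (xs.length : Int) := by omega
    have hklt : k.toNat < xs.length := by omega
    rw [PySem.List.pyRange_one_cons hlt, List.any_cons,
      List.drop_eq_getElem_cons hklt, recG]
    have h1 : PySem.List.pyGetD xs k [] = xs[k.toNat] :=
      PySem.List.pyGetD_eq_getElem xs [] hk hlt
    have h2 : (k+1).toNat = k.toNat + 1 := by omega
    rw [h1, h2, ih (k+1) (by omega) (by omega), h2]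

lemma anyVals (xs : List (List Int)) (P : List Int → Bool) (k : Int) (hk : 0 ≤ k) :
    (PySem.List.pyRange k (xs.length : Int) 1).any (fun c => P (PySem.List.pyGetD xs c []))
    = (xs.drop k.toNat).any P := by
  have := anyDrop xs (fun s _ => P s) (xs.length - k.toNat) k hk rfl
  exact this.trans (by
    generalize xs.drop k.toNat = l
    induction l with
    | nil => simp [recG]
    | cons s rest ih => simp [recG, ih])

-- A's size-2 double loop = the suffix recursion with the pair body
lemma A2_eq (xs : List (List Int)) :
    (PySem.List.pyRange 0 (xs.length : Int) 1).any (fun a =>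
      (PySem.List.pyRange (a+1) (xs.length : Int) 1).any (fun b =>
        !pvInter (PySem.List.pyGetD xs a []) (PySem.List.pyGetD xs b [])))
    = recG (fun s rest => rest.any (fun t => !pvInter s t)) xs := by
  have h : ∀ a ∈ PySem.List.pyRange 0 (xs.length : Int) 1,
      (PySem.List.pyRange (a+1) (xs.length : Int) 1).any (fun b =>
        !pvInter (PySem.List.pyGetD xs a []) (PySem.List.pyGetD xs b []))
      = (fun s rest => rest.any (fun t => !pvInter s t))
          (PySem.List.pyGetD xs a []) (xs.drop (a+1).toNat) := by
    intro a ha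
    have h0 : 0 ≤ a := ((PySem.List.mem_pyRange_one).mp ha).1
    exact anyVals xs (fun t => !pvInter (PySem.List.pyGetD xs a []) t) (a+1) (by omega)
  rw [PySem.List.any_congr_mem h]
  exact (anyDrop xs (fun s rest => rest.any (fun t => !pvInter s t))
    (xs.length - (0:Int).toNat) 0 le_rfl rfl).trans (by norm_num)

-- A's size-3 triple loop = the suffix recursion with the nested body
lemma A3_eq (xs : List (List Int)) :
    (PySem.List.pyRange 0 (xs.length : Int) 1).any (fun a =>
      (PySem.List.pyRange (a+1) (xs.length : Int) 1).any (fun b =>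
        if pvInter (PySem.List.pyGetD xs a []) (PySem.List.pyGetD xs b []) then false
        else (PySem.List.pyRange (b+1) (xs.length : Int) 1).any (fun c =>
          !pvInter (PySem.List.pyGetD xs c []) (PySem.List.pyGetD xs a []) &&
          !pvInter (PySem.List.pyGetD xs c []) (PySem.List.pyGetD xs b []))))
    = recG (fun s rest => recG (fun t restb =>
        if pvInter s t then false
        else restb.any (fun u => !pvInter u s && !pvInter u t)) rest) xs := by
  have h : ∀ a ∈ PySem.List.pyRange 0 (xs.length : Int) 1,
      (PySem.List.pyRange (a+1) (xs.length : Int) 1).any (fun b =>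
        if pvInter (PySem.List.pyGetD xs a []) (PySem.List.pyGetD xs b []) then false
        else (PySem.List.pyRange (b+1) (xs.length : Int) 1).any (fun c =>
          !pvInter (PySem.List.pyGetD xs c []) (PySem.List.pyGetD xs a []) &&
          !pvInter (PySem.List.pyGetD xs c []) (PySem.List.pyGetD xs b [])))
      = (fun s rest => recG (fun t restb =>
          if pvInter s t then false
          else restb.any (fun u => !pvInter u s && !pvInter u t)) rest)
          (PySem.List.pyGetD xs a []) (xs.drop (a+1).toNat) := by
    intro a ha
    have h0 : 0 ≤ a := ((PySem.List.mem_pyRange_one).mp ha).1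
    have hb : ∀ b ∈ PySem.List.pyRange (a+1) (xs.length : Int) 1,
        (if pvInter (PySem.List.pyGetD xs a []) (PySem.List.pyGetD xs b []) then false
         else (PySem.List.pyRange (b+1) (xs.length : Int) 1).any (fun c =>
           !pvInter (PySem.List.pyGetD xs c []) (PySem.List.pyGetD xs a []) &&
           !pvInter (PySem.List.pyGetD xs c []) (PySem.List.pyGetD xs b [])))
        = (fun t restb =>
            if pvInter (PySem.List.pyGetD xs a []) t then false
            else restb.any (fun u => !pvInter u (PySem.List.pyGetD xs a []) && !pvInter u t))
            (PySem.List.pyGetD xs b []) (xs.drop (b+1).toNat) := by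
      intro b hbmem
      have hb0 : 0 ≤ b := le_trans (by omega) ((PySem.List.mem_pyRange_one).mp hbmem).1
      simp only
      rw [anyVals xs (fun u => !pvInter u (PySem.List.pyGetD xs a []) &&
        !pvInter u (PySem.List.pyGetD xs b [])) (b+1) (by omega)]
    simp only
    rw [PySem.List.any_congr_mem hb]
    exact anyDrop xs (fun t restb =>
      if pvInter (PySem.List.pyGetD xs a []) t then false
      else restb.any (fun u => !pvInter u (PySem.List.pyGetD xs a []) && !pvInter u t))
      (xs.length - (a+1).toNat) (a+1) (by omega) rfl
  rw [PySem.List.any_congr_mem h]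
  exact (anyDrop xs (fun s rest => recG (fun t restb =>
      if pvInter s t then false
      else restb.any (fun u => !pvInter u s && !pvInter u t)) rest)
    (xs.length - (0:Int).toNat) 0 le_rfl rfl).trans (by norm_num)

lemma recG2_eq_has2 (xs : List (List Int)) :
    recG (fun s rest => rest.any (fun t => !pvInter s t)) xs = pvHas2 xs := by
  induction xs with
  | nil => rfl
  | cons s rest ih =>
    rw [recG, pvHas2, ih]
    congr 1
    exact List.any_congr rfl (fun t => (pvDisj_eq_not_inter s t).symm)

lemma recGb_eq_has2_filter (s : List Int) (rest : List (List Int)) :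
    recG (fun t restb =>
      if pvInter s t then false
      else restb.any (fun u => !pvInter u s && !pvInter u t)) rest
    = pvHas2 (rest.filter (fun t => pvDisj s t)) := by
  induction rest with
  | nil => rfl
  | cons t r ih =>
    rw [recG, ih]
    by_cases hst : pvInter s t = true
    · have hd : pvDisj s t = false := by rw [pvDisj_eq_not_inter, hst]; rfl
      simp [hd, hst]
    · have hst' : pvInter s t = false := Bool.eq_false_iff.mpr hst
      have hdisj : pvDisj s t = true := by rw [pvDisj_eq_not_inter, hst']; rfl
      rw [List.filter_cons_of_pos hdisj, pvHas2, hst']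
      simp only [Bool.false_eq_true, if_false, List.any_filter]
      congr 1
      exact List.any_congr rfl (fun u => by
        rw [pvDisj_comm s u, pvDisj_comm t u, pvDisj_eq_not_inter u s,
          pvDisj_eq_not_inter u t, Bool.and_comm])

lemma recG3_eq_has3 (xs : List (List Int)) :
    recG (fun s rest => recG (fun t restb =>
      if pvInter s t then false
      else restb.any (fun u => !pvInter u s && !pvInter u t)) rest) xs = pvHas3 xs := by
  induction xs with
  | nil => rfl
  | cons s rest ih => rw [recG, pvHas3, ih, recGb_eq_has2_filter]

-- ===== VERDICT (by name: the statement is the Claim_ definition above) =====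
theorem max_matching_3cycles_spec : Claim_equal_max_matching_3cycles := by
  intro xs _
  show max_matching_3cycles xs = max_matching_3cycles_alt xs
  unfold max_matching_3cycles max_matching_3cycles_alt
  rcases xs with _ | ⟨s, rest⟩
  · simp
  · have hne : ((s :: rest : List (List Int)).length : Int) ≠ 0 := by
      simp only [List.length_cons]
      omega
    simp only [hne, if_false, List.isEmpty_cons,
      A2_eq (s :: rest), A3_eq (s :: rest), recG2_eq_has2, recG3_eq_has3]
    simp
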